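-- pv_equiv track=rewrite | github.com/JerryZhuzq/leetcode | test.py | max_height_dp
-- ===== SOURCE A (Python) =====
-- def max_height_dp(N, buildings, heights):
--     constraints = {}
--
--     dp = [float('inf')] * (N+1)
--     for b, h in zip(buildings, heights):
--         constraints[b] = h
--     constraints[1] = 0
--     for i in range(1, N+1):
--         if i in constraints:
--             dp[i] = min(dp[i-1]+1, constraints[i])
--         else:
--             dp[i] = dp[i-1] + 1
--
--     for i in range(N-1, 1, -1):
--         dp[i] = min(dp[i], dp[i + 1] + 1)
--     return max(dp[1:])
-- ===== SOURCE B (Python) =====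
-- def max_height_dp(N, buildings, heights):
--     # effective constraints: position 1 is fixed at 0; other in-range positions, last write wins
--     c = {1: 0}
--     for b, h in zip(buildings, heights):
--         if 1 <= b <= N and b != 1:
--             c[b] = h
--     pts = sorted(c.items(), key=lambda p: p[0])
--     m = len(pts)
--     pos = [p for p, _ in pts]
--     e = [h for _, h in pts]
--     for i in range(1, m):
--         e[i] = min(e[i], e[i - 1] + pos[i] - pos[i - 1])
--     for i in range(m - 2, -1, -1):
--         e[i] = min(e[i], e[i + 1] + pos[i + 1] - pos[i])
--     best = e[m - 1] + (N - pos[m - 1])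
--     for i in range(m - 1):
--         best = max(best, (e[i] + e[i + 1] + pos[i + 1] - pos[i]) // 2)
--     return max(0, best)
-- ===== Notes on version B (the rewrite author's own statement) =====
-- stated objective: faster
-- what changed: Instead of filling and sweeping an O(N) dp array over every position, B keeps only the constrained positions, sorts them, propagates the constraints with two passes over the sorted points, and computes the peak between adjacent points (and the tail up to N) with a closed formula.
import Mathlib
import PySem

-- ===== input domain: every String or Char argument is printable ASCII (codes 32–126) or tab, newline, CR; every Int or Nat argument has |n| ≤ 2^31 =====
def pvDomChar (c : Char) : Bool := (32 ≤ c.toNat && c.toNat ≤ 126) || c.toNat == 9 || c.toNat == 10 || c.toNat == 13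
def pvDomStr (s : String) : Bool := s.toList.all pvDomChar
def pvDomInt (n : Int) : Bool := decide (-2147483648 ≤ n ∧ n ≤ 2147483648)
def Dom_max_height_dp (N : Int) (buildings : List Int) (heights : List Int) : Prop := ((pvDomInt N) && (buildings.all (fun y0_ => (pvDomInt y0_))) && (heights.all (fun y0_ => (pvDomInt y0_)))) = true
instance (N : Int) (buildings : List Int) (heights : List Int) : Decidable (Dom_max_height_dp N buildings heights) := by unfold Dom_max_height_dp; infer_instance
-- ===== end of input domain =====

-- B replaces A's two O(N) sweeps over a dp array by sorting the constrained positions and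
-- computing the achievable peak between adjacent constraints in closed form (objective: faster).

-- ===== PORT A =====
-- float('inf') is modelled as `none : Option Int`: in A it is only ever incremented,
-- min'ed against an int, or max'ed, and these helpers are exact for that use.
def oincr : Option Int → Option Int
  | none => none
  | some x => some (x + 1)

def omin : Option Int → Option Int → Option Int
  | none, y => y
  | some a, none => some a
  | some a, some b => some (min a b)

def omax : Option Int → Option Int → Option Int
  | none, _ => none
  | _, none => none
  | some a, some b => some (max a b)

def max_height_dp (N : Int) (buildings : List Int) (heights : List Int) : Int :=
  let constraints : PySem.Dict Int Int :=
    (buildings.zip heights).foldl (fun d p => d.insert p.1 p.2) PySem.Dict.empty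
  let constraints := constraints.insert 1 0
  let dp0 : List (Option Int) := List.replicate (N + 1).toNat none
  let dp1 := (PySem.List.pyRange 1 (N + 1) 1).foldl (fun dp i =>
    if constraints.contains i then
      PySem.List.pySetD dp i
        (omin (oincr (PySem.List.pyGetD dp (i - 1) none)) (some (constraints.getD i 0)))
    else
      PySem.List.pySetD dp i (oincr (PySem.List.pyGetD dp (i - 1) none))) dp0
  let dp2 := (PySem.List.pyRange (N - 1) 1 (-1)).foldl (fun dp i =>
    PySem.List.pySetD dp i
      (omin (PySem.List.pyGetD dp i none) (oincr (PySem.List.pyGetD dp (i + 1) none)))) dp1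
  match PySem.List.slice dp2 (some 1) none with
  | [] => 0                      -- Python: max([]) raises ValueError; excluded by Pre_
  | x :: t => (t.foldl omax x).getD 0   -- the max is dp[1] = 0 or larger, hence finite

-- ===== PORT B =====
def max_height_dp_alt (N : Int) (buildings : List Int) (heights : List Int) : Int :=
  let c : PySem.Dict Int Int := (buildings.zip heights).foldl
    (fun d p => if 1 ≤ p.1 ∧ p.1 ≤ N ∧ p.1 ≠ 1 then d.insert p.1 p.2 else d)
    ((PySem.Dict.empty : PySem.Dict Int Int).insert 1 0)
  let pts := PySem.List.sorted c.items (fun p => p.1)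
  let m : Int := pts.length
  let pos := pts.map (fun p => p.1)
  let e0 := pts.map (fun p => p.2)
  let e1 := (PySem.List.pyRange 1 m 1).foldl (fun e i =>
    PySem.List.pySetD e i (min (PySem.List.pyGetD e i 0)
      (PySem.List.pyGetD e (i - 1) 0 + PySem.List.pyGetD pos i 0 - PySem.List.pyGetD pos (i - 1) 0))) e0
  let e2 := (PySem.List.pyRange (m - 2) (-1) (-1)).foldl (fun e i =>
    PySem.List.pySetD e i (min (PySem.List.pyGetD e i 0)
      (PySem.List.pyGetD e (i + 1) 0 + PySem.List.pyGetD pos (i + 1) 0 - PySem.List.pyGetD pos i 0))) e1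
  let best0 := PySem.List.pyGetD e2 (m - 1) 0 + (N - PySem.List.pyGetD pos (m - 1) 0)
  let best := (PySem.List.pyRange 0 (m - 1) 1).foldl (fun best i =>
    max best (PySem.Int.floordiv (PySem.List.pyGetD e2 i 0 + PySem.List.pyGetD e2 (i + 1) 0
      + PySem.List.pyGetD pos (i + 1) 0 - PySem.List.pyGetD pos i 0) 2)) best0
  max 0 best

-- ===== PRECONDITION & SPEC =====
-- Pre_ excludes exactly N ≤ 0, where A raises ValueError (max of the empty slice dp[1:]).
def Pre_max_height_dp (N : Int) (buildings : List Int) (heights : List Int) : Prop := 1 ≤ N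
instance (N : Int) (buildings : List Int) (heights : List Int) : Decidable (Pre_max_height_dp N buildings heights) := by unfold Pre_max_height_dp; infer_instance

def pvWitness_max_height_dp : Int × List Int × List Int := (4, [3, 2], [1, 5])

def Spec_max_height_dp (N : Int) (buildings : List Int) (heights : List Int) (out : Int) : Prop := out = max_height_dp_alt N buildings heights
instance (N : Int) (buildings : List Int) (heights : List Int) (out : Int) : Decidable (Spec_max_height_dp N buildings heights out) := by unfold Spec_max_height_dp; infer_instance

-- ===== CLAIM (what is proved, stated in full; the proofs are below) =====
def Claim_equal_max_height_dp : Prop := ∀ (N : Int) (buildings : List Int) (heights : List Int), Dom_max_height_dp N buildings heights → Pre_max_height_dp N buildings heights → Spec_max_height_dp N buildings heights (max_height_dp N buildings heights)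
-- ===== LEMMAS AND PROOFS =====

-- ---- generic min?/max?-style helpers ----
theorem pvMin_getD_le {l : List Int} {x : Int} (hx : x ∈ l) : l.min?.getD 0 ≤ x := by
  cases h : l.min? with
  | none => simp [List.min?_eq_none_iff] at h; subst h; cases hx
  | some a =>
    rcases (List.min?_eq_some_iff).mp h with ⟨_, hb⟩
    simpa using hb x hx

theorem pvMin_getD_mem {l : List Int} (h : l ≠ []) : l.min?.getD 0 ∈ l := by
  cases hm : l.min? with
  | none => simp [List.min?_eq_none_iff] at hm; exact absurd hm h
  | some a => rcases (List.min?_eq_some_iff).mp hm with ⟨ha, _⟩; simpa using ha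

theorem pvFoldlMax_le {t : List Int} {a c : Int} (ha : a ≤ c) (ht : ∀ y ∈ t, y ≤ c) :
    t.foldl max a ≤ c := by
  rcases PySem.List.foldl_max_mem t a with h | h
  · omega
  · exact ht _ h

-- ---- the constraint-value functions ----
def Hval (L : List (Int × Int)) (i : Int) : Int :=
  ((L.map (fun p => p.2 + |i - p.1|)).min?).getD 0

def Fval (L : List (Int × Int)) (i : Int) : Int :=
  (((L.filter (fun p => decide (p.1 ≤ i))).map (fun p => p.2 + (i - p.1))).min?).getD 0

def Gval (N : Int) (L : List (Int × Int)) (i : Int) : Int :=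
  (((PySem.List.pyRange i (N + 1) 1).map (fun j => Fval L j + (j - i))).min?).getD 0

def GoodL (N : Int) (L : List (Int × Int)) : Prop :=
  (1, 0) ∈ L ∧ (∀ p ∈ L, 1 ≤ p.1 ∧ p.1 ≤ N) ∧ (L.map Prod.fst).Nodup

theorem Hval_le {L : List (Int × Int)} {p : Int × Int} (hp : p ∈ L) (i : Int) :
    Hval L i ≤ p.2 + |i - p.1| := by
  apply pvMin_getD_le
  exact List.mem_map.mpr ⟨p, hp, rfl⟩

theorem Hval_attain {L : List (Int × Int)} (h : L ≠ []) (i : Int) :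
    ∃ p ∈ L, Hval L i = p.2 + |i - p.1| := by
  have := pvMin_getD_mem (l := L.map (fun p => p.2 + |i - p.1|)) (by simpa using h)
  rcases List.mem_map.mp this with ⟨p, hp, he⟩
  exact ⟨p, hp, he.symm⟩

theorem Fval_le {L : List (Int × Int)} {p : Int × Int} (hp : p ∈ L) {i : Int} (hpi : p.1 ≤ i) :
    Fval L i ≤ p.2 + (i - p.1) := by
  apply pvMin_getD_le
  exact List.mem_map.mpr ⟨p, List.mem_filter.mpr ⟨hp, by simpa using hpi⟩, rfl⟩

theorem Fval_attain {L : List (Int × Int)} {i : Int} (h : ∃ p ∈ L, p.1 ≤ i) :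
    ∃ p ∈ L, p.1 ≤ i ∧ Fval L i = p.2 + (i - p.1) := by
  have hne : (L.filter (fun p => decide (p.1 ≤ i))).map (fun p => p.2 + (i - p.1)) ≠ [] := by
    rcases h with ⟨p, hp, hpi⟩
    have : p ∈ L.filter (fun p => decide (p.1 ≤ i)) := List.mem_filter.mpr ⟨hp, by simpa using hpi⟩
    exact List.ne_nil_of_mem (List.mem_map.mpr ⟨p, this, rfl⟩)
  have := pvMin_getD_mem hne
  rcases List.mem_map.mp this with ⟨p, hp, he⟩
  have hf := List.mem_filter.mp hp
  exact ⟨p, hf.1, by simpa using hf.2, he.symm⟩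

theorem Gval_le {N i j : Int} (L : List (Int × Int)) (hij : i ≤ j) (hjN : j ≤ N) :
    Gval N L i ≤ Fval L j + (j - i) := by
  apply pvMin_getD_le
  exact List.mem_map.mpr ⟨j, (PySem.List.mem_pyRange_one).mpr ⟨hij, by omega⟩, rfl⟩

theorem Gval_attain {N i : Int} (L : List (Int × Int)) (hiN : i ≤ N) :
    ∃ j, i ≤ j ∧ j ≤ N ∧ Gval N L i = Fval L j + (j - i) := by
  have hne : (PySem.List.pyRange i (N + 1) 1).map (fun j => Fval L j + (j - i)) ≠ [] := by
    have : i ∈ PySem.List.pyRange i (N + 1) 1 := (PySem.List.mem_pyRange_one).mpr ⟨le_refl _, by omega⟩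
    exact List.ne_nil_of_mem (List.mem_map.mpr ⟨i, this, rfl⟩)
  have := pvMin_getD_mem hne
  rcases List.mem_map.mp this with ⟨j, hj, he⟩
  rcases (PySem.List.mem_pyRange_one).mp hj with ⟨h1, h2⟩
  exact ⟨j, h1, by omega, he.symm⟩

theorem pvKeyUnique {L : List (Int × Int)} (hnd : (L.map Prod.fst).Nodup) {p q : Int × Int}
    (hp : p ∈ L) (hq : q ∈ L) (hk : p.1 = q.1) : p = q := by
  exact List.inj_on_of_nodup_map hnd hp hq hk

theorem Fval_one {N : Int} {L : List (Int × Int)} (hg : GoodL N L) : Fval L 1 = 0 := by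
  obtain ⟨hone, hmem, hnd⟩ := hg
  have hle : Fval L 1 ≤ 0 := by
    have := Fval_le (p := (1, 0)) hone (i := 1) (by norm_num)
    simpa using this
  have hge : 0 ≤ Fval L 1 := by
    rcases Fval_attain (i := 1) ⟨(1, 0), hone, by norm_num⟩ with ⟨p, hp, hpi, he⟩
    have h1 := (hmem p hp).1
    have hp1 : p.1 = 1 := le_antisymm hpi h1
    have : p = (1, 0) := pvKeyUnique hnd hp hone (by simpa using hp1)
    subst this
    simp at he
    omega
  omega

-- F's forward recurrence
theorem Fval_step_some {N : Int} {L : List (Int × Int)} (hg : GoodL N L) {i c : Int} (hi : 2 ≤ i)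
    (hcL : (i, c) ∈ L) : Fval L i = min (Fval L (i - 1) + 1) c := by
  obtain ⟨hone, hmem, hnd⟩ := hg
  rcases Fval_attain (i := i - 1) ⟨(1, 0), hone, by norm_num; omega⟩ with ⟨q, hq, hqi, heq⟩
  have hFprev_le : Fval L i ≤ Fval L (i - 1) + 1 := by
    have := Fval_le hq (i := i) (by omega)
    omega
  rcases Fval_attain (i := i) ⟨(1, 0), hone, by norm_num; omega⟩ with ⟨r, hr, hri, her⟩
  have hle : Fval L i ≤ min (Fval L (i - 1) + 1) c := by
    have h2 : Fval L i ≤ c := by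
      have := Fval_le hcL (i := i) (le_refl i)
      simpa using this
    exact le_min hFprev_le h2
  have hge : min (Fval L (i - 1) + 1) c ≤ Fval L i := by
    by_cases hri1 : r.1 = i
    · have : r = (i, c) := pvKeyUnique hnd hr hcL (by simpa using hri1)
      subst this
      simp at her
      have := min_le_right (Fval L (i - 1) + 1) c
      omega
    · have hr1 : r.1 ≤ i - 1 := by omega
      have := Fval_le hr (i := i - 1) hr1
      have := min_le_left (Fval L (i - 1) + 1) c
      omega
  omega

theorem Fval_step_none {N : Int} {L : List (Int × Int)} (hg : GoodL N L) {i : Int} (hi : 2 ≤ i)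
    (hno : ∀ c, (i, c) ∉ L) : Fval L i = Fval L (i - 1) + 1 := by
  obtain ⟨hone, hmem, hnd⟩ := hg
  rcases Fval_attain (i := i - 1) ⟨(1, 0), hone, by norm_num; omega⟩ with ⟨q, hq, hqi, heq⟩
  have hFprev_le : Fval L i ≤ Fval L (i - 1) + 1 := by
    have := Fval_le hq (i := i) (by omega)
    omega
  rcases Fval_attain (i := i) ⟨(1, 0), hone, by norm_num; omega⟩ with ⟨r, hr, hri, her⟩
  have hri1 : r.1 ≤ i - 1 := by
    rcases lt_or_eq_of_le hri with h | h
    · omega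
    · exact absurd (show (i, r.2) ∈ L by rw [← h]; simpa using hr) (hno r.2)
  have := Fval_le hr (i := i - 1) hri1
  omega

theorem Gval_step {N : Int} (L : List (Int × Int)) {i : Int} (h1 : 1 ≤ i) (hiN : i ≤ N - 1) :
    Gval N L i = min (Fval L i) (Gval N L (i + 1) + 1) := by
  have hle : Gval N L i ≤ min (Fval L i) (Gval N L (i + 1) + 1) := by
    have h1 : Gval N L i ≤ Fval L i := by
      have := Gval_le (N := N) (i := i) (j := i) L (le_refl i) (by omega)
      omega
    have h2 : Gval N L i ≤ Gval N L (i + 1) + 1 := by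
      rcases Gval_attain (N := N) (i := i + 1) L (by omega) with ⟨j, hj1, hj2, he⟩
      have := Gval_le (N := N) (i := i) (j := j) L (by omega) hj2
      omega
    exact le_min h1 h2
  have hge : min (Fval L i) (Gval N L (i + 1) + 1) ≤ Gval N L i := by
    rcases Gval_attain (N := N) (i := i) L (by omega) with ⟨j, hj1, hj2, he⟩
    rcases eq_or_lt_of_le hj1 with h | h
    · have := min_le_left (Fval L i) (Gval N L (i + 1) + 1)
      subst h
      omega
    · have := Gval_le (N := N) (i := i + 1) (j := j) L (by omega) hj2
      have := min_le_right (Fval L i) (Gval N L (i + 1) + 1)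
      omega
  omega

theorem Gval_eq_Hval {N : Int} {L : List (Int × Int)} (hg : GoodL N L) {i : Int}
    (h1 : 1 ≤ i) (hiN : i ≤ N) : Gval N L i = Hval L i := by
  obtain ⟨hone, hmem, hnd⟩ := hg
  have hLne : L ≠ [] := List.ne_nil_of_mem hone
  have hle : Gval N L i ≤ Hval L i := by
    rcases Hval_attain hLne i with ⟨p, hp, he⟩
    have hpB := hmem p hp
    rcases le_total p.1 i with hpi | hpi
    · have h1' := Gval_le (N := N) (i := i) (j := i) L (le_refl i) hiN
      have h2' := Fval_le hp (i := i) hpi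
      rcases abs_cases (i - p.1) with ⟨ha, _⟩ | ⟨ha, _⟩ <;> omega
    · have h1' := Gval_le (N := N) (i := i) (j := p.1) L hpi hpB.2
      have h2' := Fval_le hp (i := p.1) (le_refl _)
      rcases abs_cases (i - p.1) with ⟨ha, _⟩ | ⟨ha, _⟩ <;> omega
  have hge : Hval L i ≤ Gval N L i := by
    rcases Gval_attain (N := N) (i := i) L hiN with ⟨j, hj1, hj2, he⟩
    rcases Fval_attain (i := j) ⟨(1, 0), hone, by norm_num; omega⟩ with ⟨p, hp, hpi, hep⟩
    have := Hval_le hp i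
    rcases abs_cases (i - p.1) with ⟨ha, _⟩ | ⟨ha, _⟩ <;> omega
  omega

theorem Hval_lipschitz {L : List (Int × Int)} (h : L ≠ []) (i i' : Int) :
    Hval L i ≤ Hval L i' + |i - i'| := by
  rcases Hval_attain h i' with ⟨p, hp, he⟩
  have h1 := Hval_le hp i
  have h2 : |i - p.1| ≤ |i' - p.1| + |i - i'| := by
    have := abs_sub_le i i' p.1
    have : |i - p.1| ≤ |i - i'| + |i' - p.1| := abs_sub_le i i' p.1
    omega
  omega


-- ---- the effective constraint dictionaries ----
def dictA (zs : List (Int × Int)) : PySem.Dict Int Int :=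
  (zs.foldl (fun d p => d.insert p.1 p.2) PySem.Dict.empty).insert 1 0

def dictB (N : Int) (zs : List (Int × Int)) : PySem.Dict Int Int :=
  zs.foldl (fun d p => if 1 ≤ p.1 ∧ p.1 ≤ N ∧ p.1 ≠ 1 then d.insert p.1 p.2 else d)
    ((PySem.Dict.empty : PySem.Dict Int Int).insert 1 0)

theorem dictB_get_aux {N j : Int} (hj1 : j ≠ 1) (h1 : 1 ≤ j) (h2 : j ≤ N) :
    ∀ (zs : List (Int × Int)) (d1 d2 : PySem.Dict Int Int), d1.get? j = d2.get? j →
    (zs.foldl (fun d p => d.insert p.1 p.2) d1).get? j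
      = (zs.foldl (fun d p => if 1 ≤ p.1 ∧ p.1 ≤ N ∧ p.1 ≠ 1 then d.insert p.1 p.2 else d) d2).get? j := by
  intro zs
  induction zs with
  | nil => intro d1 d2 h; simpa using h
  | cons p t ih =>
    intro d1 d2 h
    simp only [List.foldl_cons]
    by_cases hc : 1 ≤ p.1 ∧ p.1 ≤ N ∧ p.1 ≠ 1
    · rw [if_pos hc]
      apply ih
      rw [PySem.Dict.get?_insert, PySem.Dict.get?_insert]
      split
      · rfl
      · exact h
    · rw [if_neg hc]
      apply ih
      rw [PySem.Dict.get?_insert]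
      have hne : j ≠ p.1 := by rintro rfl; exact hc ⟨h1, h2, hj1⟩
      rw [if_neg hne]
      exact h

theorem dictB_get_one (N : Int) : ∀ (zs : List (Int × Int)) (d : PySem.Dict Int Int),
    d.get? 1 = some 0 →
    (zs.foldl (fun d p => if 1 ≤ p.1 ∧ p.1 ≤ N ∧ p.1 ≠ 1 then d.insert p.1 p.2 else d) d).get? 1 = some 0 := by
  intro zs
  induction zs with
  | nil => intro d h; simpa using h
  | cons p t ih =>
    intro d h
    simp only [List.foldl_cons]
    by_cases hc : 1 ≤ p.1 ∧ p.1 ≤ N ∧ p.1 ≠ 1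
    · rw [if_pos hc]
      apply ih
      rw [PySem.Dict.get?_insert, if_neg (by exact fun he => hc.2.2 he.symm)]
      exact h
    · rw [if_neg hc]
      exact ih d h

theorem dict_get_eq (N : Int) (zs : List (Int × Int)) (j : Int) (h1 : 1 ≤ j) (h2 : j ≤ N) :
    (dictA zs).get? j = (dictB N zs).get? j := by
  by_cases hj : j = 1
  · subst hj
    unfold dictA dictB
    rw [PySem.Dict.get?_insert_self]
    exact (dictB_get_one N zs _ (PySem.Dict.get?_insert_self _ _ _)).symm
  · unfold dictA dictB
    rw [PySem.Dict.get?_insert, if_neg hj]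
    apply dictB_get_aux hj h1 h2
    rw [PySem.Dict.get?_insert, if_neg hj]

theorem dictB_eq_filter (N : Int) (zs : List (Int × Int)) :
    dictB N zs = (zs.filter (fun p => decide (1 ≤ p.1 ∧ p.1 ≤ N ∧ p.1 ≠ 1))).foldl
      (fun d p => d.insert p.1 p.2) ((PySem.Dict.empty : PySem.Dict Int Int).insert 1 0) :=
  PySem.List.foldl_ite_eq_foldl_filter (fun p : Int × Int => 1 ≤ p.1 ∧ p.1 ≤ N ∧ p.1 ≠ 1)
    (fun (d : PySem.Dict Int Int) (p : Int × Int) => d.insert p.1 p.2) zs _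

theorem dictB_keys_nodup (N : Int) (zs : List (Int × Int)) : (dictB N zs).keys.Nodup := by
  rw [dictB_eq_filter]
  exact PySem.Dict.nodup_keys_foldl_insert_key _ (fun p : Int × Int => p.1) (fun (_ : PySem.Dict Int Int) (p : Int × Int) => p.2) _ (by decide)

theorem dictB_keys_bounds (N : Int) (zs : List (Int × Int)) (hN : 1 ≤ N) :
    ∀ k ∈ (dictB N zs).keys, 1 ≤ k ∧ k ≤ N := by
  intro k hk
  rw [dictB_eq_filter,
    PySem.Dict.keys_foldl_insert_key _ (fun p : Int × Int => p.1) (fun (_ : PySem.Dict Int Int) (p : Int × Int) => p.2)] at hk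
  rcases (PySem.Set.mem_update _ _ _).mp hk with h | h
  · have : k = 1 := by
      have : ((PySem.Dict.empty : PySem.Dict Int Int).insert 1 0).keys = [1] := by decide
      rw [this] at h
      simpa using h
    omega
  · rcases List.mem_map.mp h with ⟨p, hp, rfl⟩
    have := List.of_mem_filter hp
    simp only [decide_eq_true_eq] at this
    exact ⟨this.1, this.2.1⟩

theorem dictB_one_mem (N : Int) (zs : List (Int × Int)) : ((1 : Int), (0 : Int)) ∈ (dictB N zs).items := by
  apply PySem.Dict.mem_items_of_get?_eq_some
  unfold dictB
  exact dictB_get_one N zs _ (PySem.Dict.get?_insert_self _ _ _)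

theorem dictB_goodL (N : Int) (zs : List (Int × Int)) (hN : 1 ≤ N) : GoodL N (dictB N zs).items := by
  refine ⟨dictB_one_mem N zs, ?_, ?_⟩
  · intro p hp
    exact dictB_keys_bounds N zs hN p.1 (PySem.Dict.mem_keys_of_mem_items _ hp)
  · have := dictB_keys_nodup N zs
    simpa [PySem.Dict.keys, Function.comp] using this

theorem dictB_mem_iff (N : Int) (zs : List (Int × Int)) (i c : Int) :
    (dictB N zs).get? i = some c ↔ (i, c) ∈ (dictB N zs).items :=
  PySem.Dict.get?_eq_some_iff_mem_items _ _ _ (dictB_keys_nodup N zs)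


-- ---- A's forward sweep ----
def stepA (cA : PySem.Dict Int Int) (dp : List (Option Int)) (i : Int) : List (Option Int) :=
  if cA.contains i then
    PySem.List.pySetD dp i (omin (oincr (PySem.List.pyGetD dp (i - 1) none)) (some (cA.getD i 0)))
  else
    PySem.List.pySetD dp i (oincr (PySem.List.pyGetD dp (i - 1) none))

def stepBk (dp : List (Option Int)) (i : Int) : List (Option Int) :=
  PySem.List.pySetD dp i (omin (PySem.List.pyGetD dp i none) (oincr (PySem.List.pyGetD dp (i + 1) none)))

theorem forward_inv (N : Int) (cA : PySem.Dict Int Int) (L : List (Int × Int)) (hg : GoodL N L)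
    (hmatch : ∀ i, 1 ≤ i → i ≤ N → ∀ c, (cA.get? i = some c ↔ (i, c) ∈ L)) :
    ∀ t : Nat, (t : Int) ≤ N →
    ((PySem.List.pyRange 1 ((t : Int) + 1) 1).foldl (stepA cA) (List.replicate (N + 1).toNat none)).length = (N + 1).toNat
    ∧ ∀ k : Nat, k < (N + 1).toNat →
      ((PySem.List.pyRange 1 ((t : Int) + 1) 1).foldl (stepA cA) (List.replicate (N + 1).toNat none))[k]? =
        some (if 1 ≤ k ∧ k ≤ t then some (Fval L (k : Int)) else none) := by
  intro t
  induction t with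
  | zero =>
    intro _
    have h0 : ((0 : Nat) : Int) + 1 = 1 := by norm_num
    rw [h0, PySem.List.pyRange_one_eq_nil (le_refl (1 : Int)), List.foldl_nil]
    constructor
    · simp
    · intro k hk
      rw [List.getElem?_replicate, if_pos hk, if_neg (by omega)]
  | succ t ih =>
    intro hle
    have hle' : (t : Int) ≤ N := by push_cast at hle ⊢; omega
    obtain ⟨hlen, hval⟩ := ih hle'
    have hcast : ((t + 1 : Nat) : Int) + 1 = ((t : Int) + 1) + 1 := by push_cast; ring
    rw [hcast, PySem.List.pyRange_one_succ_right (by omega : (1:Int) ≤ (t : Int) + 1), List.foldl_append]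
    set dpP := (PySem.List.pyRange 1 ((t : Int) + 1) 1).foldl (stepA cA) (List.replicate (N + 1).toNat none) with hdpP
    have htlt : t < (N + 1).toNat := by omega
    have ht1lt : t + 1 < (N + 1).toNat := by omega
    have hread : PySem.List.pyGetD dpP (((t : Int) + 1) - 1) none
        = (if 1 ≤ t then some (Fval L (t : Int)) else none) := by
      have h1 : ((t : Int) + 1) - 1 = ((t : Nat) : Int) := by ring
      rw [h1, PySem.List.pyGetD_natCast, List.getD_eq_getElem?_getD, hval t htlt]
      by_cases h : 1 ≤ t
      · rw [if_pos (show 1 ≤ t ∧ t ≤ t from ⟨h, le_refl t⟩), if_pos h]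
        rfl
      · rw [if_neg (by omega), if_neg (by omega)]
        rfl
    have hsetc : ((t : Int) + 1) = ((t + 1 : Nat) : Int) := by push_cast; ring
    have hmain : ∃ v, stepA cA dpP ((t : Int) + 1) = dpP.set (t + 1) v ∧ v = some (Fval L ((t : Int) + 1)) := by
      unfold stepA
      by_cases hex : ∃ c, ((t : Int) + 1, c) ∈ L
      · rcases hex with ⟨c, hc⟩
        have hget : cA.get? ((t : Int) + 1) = some c := (hmatch _ (by omega) (by omega) c).mpr hc
        have hcont : cA.contains ((t : Int) + 1) = true := by
          rw [PySem.Dict.contains_eq_isSome_get?, hget]; rfl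
        have hgetD : cA.getD ((t : Int) + 1) 0 = c := by
          rw [PySem.Dict.getD_eq_get?_getD, hget]; rfl
        rw [if_pos hcont, hread, hgetD, hsetc, PySem.List.pySetD_natCast]
        refine ⟨_, rfl, ?_⟩
        by_cases ht : 1 ≤ t
        · rw [if_pos ht]
          have hstep := Fval_step_some hg (i := (t : Int) + 1) (by omega) hc
          have hm1 : ((t : Int) + 1) - 1 = (t : Int) := by ring
          rw [hm1] at hstep
          simp [omin, oincr, hstep]
        · have ht0 : t = 0 := by omega
          subst ht0
          have hc0 : c = 0 := by
            have := pvKeyUnique hg.2.2 hc hg.1 (by norm_num)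
            simpa using congrArg Prod.snd this
          subst hc0
          rw [if_neg (by omega)]
          simp only [omin, oincr]
          norm_num
          exact (Fval_one hg).symm
      · have hget : cA.get? ((t : Int) + 1) = none := by
          cases hg2 : cA.get? ((t : Int) + 1) with
          | none => rfl
          | some c => exact absurd ⟨c, (hmatch _ (by omega) (by omega) c).mp hg2⟩ hex
        have hcont : cA.contains ((t : Int) + 1) = false := by
          rw [PySem.Dict.contains_eq_isSome_get?, hget]; rfl
        have ht : 1 ≤ t := by
          by_contra h
          have ht0 : t = 0 := by omega
          subst ht0
          exact hex ⟨0, by simpa using hg.1⟩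
        rw [if_neg (by simp [hcont]), hread, if_pos ht, hsetc, PySem.List.pySetD_natCast]
        refine ⟨_, rfl, ?_⟩
        have hstep := Fval_step_none hg (i := (t : Int) + 1) (by omega) (fun c hc => hex ⟨c, hc⟩)
        have hm1 : ((t : Int) + 1) - 1 = (t : Int) := by ring
        rw [hm1] at hstep
        simp [oincr, hstep]
    rcases hmain with ⟨v, hstep, hv⟩
    rw [List.foldl_cons, List.foldl_nil, hstep]
    constructor
    · simp [hlen]
    · intro k hk
      rw [List.getElem?_set]
      by_cases hkt : t + 1 = k
      · subst hkt
        rw [if_pos rfl, if_pos (by omega), hv, if_pos (by omega)]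
        norm_num
      · rw [if_neg hkt, hval k hk]
        by_cases h1 : 1 ≤ k ∧ k ≤ t
        · rw [if_pos h1, if_pos (by omega)]
        · rw [if_neg h1, if_neg (by omega)]


-- ---- A's backward sweep ----
def valB (N : Int) (L : List (Int × Int)) (i : Int) (k : Nat) : Option Int :=
  if k = 0 then none else if (k : Int) ≤ i then some (Fval L (k : Int)) else some (Gval N L (k : Int))

theorem Gval_N (N : Int) (L : List (Int × Int)) : Gval N L N = Fval L N := by
  have h1 := Gval_le (N := N) (i := N) (j := N) L (le_refl N) (le_refl N)
  rcases Gval_attain (N := N) (i := N) L (le_refl N) with ⟨j, hj1, hj2, he⟩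
  have : j = N := by omega
  subst this
  omega

theorem back_go (N : Int) (L : List (Int × Int)) :
    ∀ (n : Nat) (dp : List (Option Int)),
      ((n : Int) + 1 ≤ N - 1 ∨ n = 0) →
      dp.length = (N + 1).toNat →
      (∀ k : Nat, k < (N + 1).toNat → dp[k]? = some (valB N L ((n : Int) + 1) k)) →
      ((PySem.List.pyRange ((n : Int) + 1) 1 (-1)).foldl stepBk dp).length = (N + 1).toNat
      ∧ ∀ k : Nat, k < (N + 1).toNat →
        ((PySem.List.pyRange ((n : Int) + 1) 1 (-1)).foldl stepBk dp)[k]? = some (valB N L 1 k) := by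
  intro n
  induction n with
  | zero =>
    intro dp _ hlen hval
    have h0 : ((0 : Nat) : Int) + 1 = 1 := by norm_num
    rw [h0] at hval ⊢
    rw [PySem.List.pyRange_neg_one_eq_nil (le_refl (1 : Int)), List.foldl_nil]
    exact ⟨hlen, hval⟩
  | succ n ih =>
    intro dp hcond hlen hval
    have hc2 : ((n + 1 : Nat) : Int) + 1 = (n : Int) + 2 := by push_cast; ring
    have hi : (n : Int) + 2 ≤ N - 1 := by
      rcases hcond with h | h
      · omega
      · exact absurd h (Nat.succ_ne_zero n)
    rw [hc2] at hval ⊢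
    rw [PySem.List.pyRange_neg_one_cons (by omega : (1 : Int) < (n : Int) + 2), List.foldl_cons]
    have hn2lt : n + 2 < (N + 1).toNat := by omega
    have hn3lt : n + 3 < (N + 1).toNat := by omega
    have hr1 : PySem.List.pyGetD dp ((n : Int) + 2) none = some (Fval L ((n : Int) + 2)) := by
      have hcast : ((n : Int) + 2) = ((n + 2 : Nat) : Int) := by push_cast; ring
      rw [hcast, PySem.List.pyGetD_natCast, List.getD_eq_getElem?_getD, hval _ hn2lt]
      unfold valB
      rw [if_neg (by omega), if_pos (by push_cast; omega)]
      push_cast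
      rfl
    have hr2 : PySem.List.pyGetD dp (((n : Int) + 2) + 1) none = some (Gval N L ((n : Int) + 3)) := by
      have hcast : (((n : Int) + 2) + 1) = ((n + 3 : Nat) : Int) := by push_cast; ring
      rw [hcast, PySem.List.pyGetD_natCast, List.getD_eq_getElem?_getD, hval _ hn3lt]
      unfold valB
      rw [if_neg (by omega), if_neg (by push_cast; omega)]
      push_cast
      rfl
    have hstep : stepBk dp ((n : Int) + 2) = dp.set (n + 2) (some (Gval N L ((n : Int) + 2))) := by
      unfold stepBk
      rw [hr1, hr2]
      have hgs := Gval_step (N := N) (L := L) (i := (n : Int) + 2) (by omega) (by omega)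
      rw [show ((n : Int) + 2) + 1 = (n : Int) + 3 by ring] at hgs
      have hv : omin (some (Fval L ((n : Int) + 2))) (oincr (some (Gval N L ((n : Int) + 3))))
          = some (Gval N L ((n : Int) + 2)) := by
        simp [omin, oincr, hgs]
      rw [hv, show ((n : Int) + 2) = ((n + 2 : Nat) : Int) by push_cast; ring,
        PySem.List.pySetD_natCast]
    rw [show ((n : Int) + 2) - 1 = (n : Int) + 1 by ring, hstep]
    refine ih _ ?_ ?_ ?_
    · by_cases h : n = 0
      · right; exact h
      · left; omega
    · simp [hlen]
    · intro k' hk'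
      rw [List.getElem?_set]
      by_cases hkn : n + 2 = k'
      · subst hkn
        rw [if_pos rfl, if_pos (by omega)]
        unfold valB
        rw [if_neg (by omega), if_neg (by push_cast; omega)]
        push_cast
        rfl
      · rw [if_neg hkn, hval _ hk']
        unfold valB
        by_cases hz : k' = 0
        · rw [if_pos hz, if_pos hz]
        · rw [if_neg hz, if_neg hz]
          by_cases hle : (k' : Int) ≤ (n : Int) + 1
          · rw [if_pos hle, if_pos (by omega)]
          · rw [if_neg hle, if_neg (by omega)]


-- ---- evaluating port A ----
theorem foldl_omax_map (l : List Int) : ∀ (a : Int),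
    ((l.map some).foldl omax (some a)) = some (l.foldl max a) := by
  induction l with
  | nil => intro a; rfl
  | cons x t ih =>
    intro a
    simp only [List.map_cons, List.foldl_cons]
    rw [show omax (some a) (some x) = some (max a x) from rfl, ih]

theorem A_result (N : Int) (buildings heights : List Int) (hN : 1 ≤ N) :
    max_height_dp N buildings heights
      = ((PySem.List.pyRange 2 (N + 1) 1).map
          (fun i => Gval N ((dictB N (buildings.zip heights)).items) i)).foldl max 0 := by
  have hA : max_height_dp N buildings heights
      = (match PySem.List.slice ((PySem.List.pyRange (N - 1) 1 (-1)).foldl stepBk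
            ((PySem.List.pyRange 1 (N + 1) 1).foldl (stepA (dictA (buildings.zip heights)))
              (List.replicate (N + 1).toNat none))) (some 1) none with
         | [] => (0 : Int)
         | x :: t => (t.foldl omax x).getD 0) := rfl
  set zs := buildings.zip heights with hzs
  set L := (dictB N zs).items with hLdef
  have hg : GoodL N L := dictB_goodL N zs hN
  have hmatch : ∀ i, 1 ≤ i → i ≤ N → ∀ c, ((dictA zs).get? i = some c ↔ (i, c) ∈ L) := by
    intro i h1 h2 c
    rw [dict_get_eq N zs i h1 h2]
    exact dictB_mem_iff N zs i c
  have hNt : ((N.toNat : Nat) : Int) = N := Int.toNat_of_nonneg (by omega)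
  obtain ⟨hlen1, hval1⟩ := forward_inv N (dictA zs) L hg hmatch N.toNat (by omega)
  rw [hNt] at hlen1 hval1
  set dp1 := (PySem.List.pyRange 1 (N + 1) 1).foldl (stepA (dictA zs)) (List.replicate (N + 1).toNat none) with hdp1
  have hback : ((PySem.List.pyRange (N - 1) 1 (-1)).foldl stepBk dp1).length = (N + 1).toNat
      ∧ ∀ k : Nat, k < (N + 1).toNat →
        ((PySem.List.pyRange (N - 1) 1 (-1)).foldl stepBk dp1)[k]? = some (valB N L 1 k) := by
    by_cases hN1 : N = 1
    · subst hN1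
      rw [show (1 : Int) - 1 = 0 from rfl, PySem.List.pyRange_neg_one_eq_nil (by norm_num)]
      simp only [List.foldl_nil]
      refine ⟨hlen1, ?_⟩
      intro k hk
      rw [hval1 k hk]
      unfold valB
      have : k = 0 ∨ k = 1 := by omega
      rcases this with h | h
      · subst h; rw [if_neg (by omega), if_pos rfl]
      · subst h; rw [if_pos (by omega), if_neg (by omega), if_pos (by norm_num)]
    · have hc : (((N - 2).toNat : Nat) : Int) + 1 = N - 1 := by omega
      have hpre : ∀ k : Nat, k < (N + 1).toNat → dp1[k]? = some (valB N L ((((N - 2).toNat : Nat) : Int) + 1) k) := by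
        intro k hk
        rw [hval1 k hk]
        unfold valB
        rw [hc]
        by_cases hk0 : k = 0
        · rw [if_neg (by omega), if_pos hk0]
        · rw [if_pos (by omega), if_neg hk0]
          by_cases hkN : (k : Int) ≤ N - 1
          · rw [if_pos hkN]
          · rw [if_neg hkN]
            have hkN' : (k : Int) = N := by omega
            rw [hkN', Gval_N]
      have := back_go N L (N - 2).toNat dp1 (by left; omega) hlen1 hpre
      rw [hc] at this
      exact this
  obtain ⟨hlen2, hval2⟩ := hback
  set dp2 := (PySem.List.pyRange (N - 1) 1 (-1)).foldl stepBk dp1 with hdp2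
  have hexp : dp2 = none ::
      (PySem.List.pyRange 1 (N + 1) 1).map (fun i => some (if i = 1 then Fval L 1 else Gval N L i)) := by
    apply List.ext_getElem?
    intro k
    cases k with
    | zero =>
      rw [hval2 0 (by omega)]
      unfold valB
      rw [if_pos rfl]
      rfl
    | succ k' =>
      rw [List.getElem?_cons_succ, List.getElem?_map, PySem.List.getElem?_pyRange_one]
      by_cases hk : k' + 1 < (N + 1).toNat
      · rw [hval2 _ hk, if_pos (by omega : k' < (N + 1 - 1).toNat)]
        unfold valB
        rw [if_neg (by omega)]
        simp only [Option.map_some]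
        by_cases h1 : ((k' + 1 : Nat) : Int) ≤ 1
        · rw [if_pos h1, if_pos (by omega : (1 : Int) + (k' : Int) = 1),
            show ((k' + 1 : Nat) : Int) = 1 by omega]
        · rw [if_neg h1, if_neg (by omega : ¬ (1 : Int) + (k' : Int) = 1)]
          have : ((k' + 1 : Nat) : Int) = 1 + (k' : Int) := by push_cast; ring
          rw [this]
      · rw [if_neg (by omega : ¬ k' < (N + 1 - 1).toNat)]
        have : dp2.length ≤ k' + 1 := by omega
        rw [List.getElem?_eq_none this]
        rfl
  rw [hA, hexp, PySem.List.slice_from _ (by norm_num : (0 : Int) ≤ 1)]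
  rw [show ((1 : Int)).toNat = 1 from rfl, List.drop_succ_cons, List.drop_zero]
  rw [PySem.List.pyRange_one_cons (by omega : (1 : Int) < N + 1), List.map_cons]
  show ((((PySem.List.pyRange (1 + 1) (N + 1) 1).map
      (fun i => some (if i = 1 then Fval L 1 else Gval N L i))).foldl omax
        (some (if (1 : Int) = 1 then Fval L 1 else Gval N L 1))).getD 0) = _
  rw [if_pos rfl, Fval_one hg]
  have hmm : (PySem.List.pyRange (1 + 1) (N + 1) 1).map
        (fun i => some (if i = 1 then (0 : Int) else Gval N L i))
      = ((PySem.List.pyRange 2 (N + 1) 1).map (fun i => Gval N L i)).map some := by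
    rw [List.map_map, show ((1 : Int) + 1) = 2 from rfl]
    apply List.map_congr_left
    intro a ha
    have := (PySem.List.mem_pyRange_one.mp ha).1
    simp only [Function.comp]
    rw [if_neg (by omega)]
  rw [hmm, foldl_omax_map]
  rfl


-- ---- B-side objects ----
def ptsOf (N : Int) (zs : List (Int × Int)) : List (Int × Int) :=
  PySem.List.sorted (dictB N zs).items (fun p => p.1)

def pjf (pts : List (Int × Int)) (k : Nat) : Int := (pts.getD k (0, 0)).1
def hjf (pts : List (Int × Int)) (k : Nat) : Int := (pts.getD k (0, 0)).2

def E1v (pts : List (Int × Int)) (l : Nat) : Int :=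
  (((List.range (l + 1)).map (fun j => hjf pts j + (pjf pts l - pjf pts j))).min?).getD 0

def E2v (pts : List (Int × Int)) (l : Nat) : Int :=
  (((List.range' l (pts.length - l)).map (fun j => E1v pts j + (pjf pts j - pjf pts l))).min?).getD 0

def peakv (pts : List (Int × Int)) (l : Nat) : Int :=
  PySem.Int.floordiv (E2v pts l + E2v pts (l + 1) + (pjf pts (l + 1) - pjf pts l)) 2

def bestv (N : Int) (pts : List (Int × Int)) : Int :=
  ((List.range (pts.length - 1)).map (peakv pts)).foldl max
    (E2v pts (pts.length - 1) + (N - pjf pts (pts.length - 1)))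

def GoodP (N : Int) (pts : List (Int × Int)) : Prop :=
  GoodL N pts ∧ pts.Pairwise (fun a b => a.1 < b.1)

theorem E1_le (pts : List (Int × Int)) {j l : Nat} (hj : j ≤ l) :
    E1v pts l ≤ hjf pts j + (pjf pts l - pjf pts j) := by
  apply pvMin_getD_le
  exact List.mem_map.mpr ⟨j, List.mem_range.mpr (by omega), rfl⟩

theorem E1_attain (pts : List (Int × Int)) (l : Nat) :
    ∃ j, j ≤ l ∧ E1v pts l = hjf pts j + (pjf pts l - pjf pts j) := by
  have hne : (List.range (l + 1)).map (fun j => hjf pts j + (pjf pts l - pjf pts j)) ≠ [] := by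
    exact List.ne_nil_of_mem (List.mem_map.mpr ⟨0, List.mem_range.mpr (by omega), rfl⟩)
  rcases List.mem_map.mp (pvMin_getD_mem hne) with ⟨j, hj, he⟩
  exact ⟨j, by have := List.mem_range.mp hj; omega, he.symm⟩

theorem E2_le (pts : List (Int × Int)) {l j : Nat} (hlj : l ≤ j) (hj : j < pts.length) :
    E2v pts l ≤ E1v pts j + (pjf pts j - pjf pts l) := by
  apply pvMin_getD_le
  exact List.mem_map.mpr ⟨j, List.mem_range'_1.mpr ⟨hlj, by omega⟩, rfl⟩

theorem E2_attain (pts : List (Int × Int)) {l : Nat} (hl : l < pts.length) :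
    ∃ j, l ≤ j ∧ j < pts.length ∧ E2v pts l = E1v pts j + (pjf pts j - pjf pts l) := by
  have hne : (List.range' l (pts.length - l)).map (fun j => E1v pts j + (pjf pts j - pjf pts l)) ≠ [] := by
    exact List.ne_nil_of_mem (List.mem_map.mpr ⟨l, List.mem_range'_1.mpr ⟨le_refl l, by omega⟩, rfl⟩)
  rcases List.mem_map.mp (pvMin_getD_mem hne) with ⟨j, hj, he⟩
  rcases List.mem_range'_1.mp hj with ⟨h1, h2⟩
  exact ⟨j, h1, by omega, he.symm⟩

theorem E1_zero (pts : List (Int × Int)) : E1v pts 0 = hjf pts 0 := by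
  have h1 := E1_le pts (j := 0) (l := 0) (le_refl 0)
  rcases E1_attain pts 0 with ⟨j, hj, he⟩
  have : j = 0 := by omega
  subst this
  omega

theorem E1_step (pts : List (Int × Int)) (l : Nat) :
    E1v pts (l + 1) = min (hjf pts (l + 1)) (E1v pts l + (pjf pts (l + 1) - pjf pts l)) := by
  have h1 : E1v pts (l + 1) ≤ hjf pts (l + 1) := by
    have := E1_le pts (j := l + 1) (l := l + 1) (le_refl _)
    omega
  have h2 : E1v pts (l + 1) ≤ E1v pts l + (pjf pts (l + 1) - pjf pts l) := by
    rcases E1_attain pts l with ⟨j, hj, he⟩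
    have := E1_le pts (j := j) (l := l + 1) (by omega)
    omega
  rcases E1_attain pts (l + 1) with ⟨j, hj, he⟩
  rcases Nat.eq_or_lt_of_le hj with h | h
  · have := min_le_left (hjf pts (l + 1)) (E1v pts l + (pjf pts (l + 1) - pjf pts l))
    rw [h] at he
    omega
  · have hjl : j ≤ l := by omega
    have := E1_le pts (j := j) (l := l) hjl
    have := min_le_right (hjf pts (l + 1)) (E1v pts l + (pjf pts (l + 1) - pjf pts l))
    omega

theorem E2_last (pts : List (Int × Int)) (hm : 1 ≤ pts.length) :
    E2v pts (pts.length - 1) = E1v pts (pts.length - 1) := by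
  have h1 := E2_le pts (l := pts.length - 1) (j := pts.length - 1) (le_refl _) (by omega)
  rcases E2_attain pts (l := pts.length - 1) (by omega) with ⟨j, hj1, hj2, he⟩
  have : j = pts.length - 1 := by omega
  subst this
  omega

theorem E2_step (pts : List (Int × Int)) {l : Nat} (hl : l + 1 < pts.length) :
    E2v pts l = min (E1v pts l) (E2v pts (l + 1) + (pjf pts (l + 1) - pjf pts l)) := by
  have h1 : E2v pts l ≤ E1v pts l := by
    have := E2_le pts (l := l) (j := l) (le_refl _) (by omega)
    omega
  have h2 : E2v pts l ≤ E2v pts (l + 1) + (pjf pts (l + 1) - pjf pts l) := by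
    rcases E2_attain pts (l := l + 1) hl with ⟨j, hj1, hj2, he⟩
    have := E2_le pts (l := l) (j := j) (by omega) hj2
    omega
  rcases E2_attain pts (l := l) (by omega) with ⟨j, hj1, hj2, he⟩
  rcases Nat.eq_or_lt_of_le hj1 with h | h
  · have := min_le_left (E1v pts l) (E2v pts (l + 1) + (pjf pts (l + 1) - pjf pts l))
    rw [← h] at he
    omega
  · have := E2_le pts (l := l + 1) (j := j) (by omega) hj2
    have := min_le_right (E1v pts l) (E2v pts (l + 1) + (pjf pts (l + 1) - pjf pts l))
    omega


-- ---- facts about the sorted constraint points ----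
theorem Hval_perm {L1 L2 : List (Int × Int)} (h : L1.Perm L2) (i : Int) : Hval L1 i = Hval L2 i := by
  rcases eq_or_ne L1 [] with h1 | h1
  · have h2 : L2 = [] := by
      subst h1; exact (h.symm).eq_nil
    subst h2; rw [h1]
  · have h2 : L2 ≠ [] := fun he => h1 (by subst he; exact h.eq_nil)
    have hle : ∀ (A B : List (Int × Int)), A.Perm B → B ≠ [] → Hval A i ≤ Hval B i := by
      intro A B hAB hB
      rcases Hval_attain hB i with ⟨p, hp, he⟩
      have := Hval_le (hAB.mem_iff.mpr hp) i
      omega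
    exact le_antisymm (hle L1 L2 h h2) (hle L2 L1 h.symm h1)

theorem getD_lt_length {pts : List (Int × Int)} {k : Nat} (h : k < pts.length) :
    pts.getD k (0, 0) = pts[k] := by
  rw [List.getD_eq_getElem?_getD, List.getElem?_eq_getElem h]
  rfl

theorem mem_pts_getD {pts : List (Int × Int)} {k : Nat} (h : k < pts.length) :
    pts.getD k (0, 0) ∈ pts := by
  rw [getD_lt_length h]
  exact List.getElem_mem h

theorem idx_of_mem {pts : List (Int × Int)} {p : Int × Int} (hp : p ∈ pts) :
    ∃ k, k < pts.length ∧ pts.getD k (0, 0) = p := by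
  rcases List.mem_iff_getElem.mp hp with ⟨k, hk, he⟩
  exact ⟨k, hk, by rw [getD_lt_length hk, he]⟩

theorem pj_lt {pts : List (Int × Int)} (hp : pts.Pairwise (fun a b => a.1 < b.1)) {k l : Nat}
    (hkl : k < l) (hl : l < pts.length) : pjf pts k < pjf pts l := by
  have := List.pairwise_iff_getElem.mp hp k l (by omega) hl hkl
  unfold pjf
  rw [getD_lt_length (by omega), getD_lt_length hl]
  exact this

theorem pj_mono {pts : List (Int × Int)} (hp : pts.Pairwise (fun a b => a.1 < b.1)) {k l : Nat}
    (hkl : k ≤ l) (hl : l < pts.length) : pjf pts k ≤ pjf pts l := by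
  rcases Nat.eq_or_lt_of_le hkl with h | h
  · rw [h]
  · exact le_of_lt (pj_lt hp h hl)

theorem pts_ne {N : Int} {pts : List (Int × Int)} (hgp : GoodP N pts) : pts ≠ [] :=
  List.ne_nil_of_mem hgp.1.1

theorem pj_bounds {N : Int} {pts : List (Int × Int)} (hgp : GoodP N pts) {k : Nat}
    (h : k < pts.length) : 1 ≤ pjf pts k ∧ pjf pts k ≤ N :=
  hgp.1.2.1 _ (mem_pts_getD h)

theorem pj_zero {N : Int} {pts : List (Int × Int)} (hgp : GoodP N pts) :
    pjf pts 0 = 1 ∧ hjf pts 0 = 0 := by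
  rcases idx_of_mem hgp.1.1 with ⟨k0, hk0, he⟩
  have hb0 := pj_bounds hgp (k := 0) (by omega)
  rcases Nat.eq_zero_or_pos k0 with h | h
  · subst h
    unfold pjf hjf
    rw [he]
    exact ⟨rfl, rfl⟩
  · exfalso
    have := pj_lt hgp.2 h hk0
    have : pjf pts k0 = 1 := by unfold pjf; rw [he]
    omega

theorem E2_eq_H {N : Int} {pts : List (Int × Int)} (hgp : GoodP N pts) {l : Nat}
    (hl : l < pts.length) : E2v pts l = Hval pts (pjf pts l) := by
  have hle : E2v pts l ≤ Hval pts (pjf pts l) := by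
    rcases Hval_attain (pts_ne hgp) (pjf pts l) with ⟨p, hp, he⟩
    rcases idx_of_mem hp with ⟨j, hj, hje⟩
    have hp1 : p.1 = pjf pts j := by unfold pjf; rw [hje]
    have hp2 : p.2 = hjf pts j := by unfold hjf; rw [hje]
    rw [hp1, hp2] at he
    rcases le_or_gt j l with hjl | hjl
    · have h1 := E2_le pts (l := l) (j := l) (le_refl _) hl
      have h2 := E1_le pts (j := j) (l := l) hjl
      have h3 := pj_mono hgp.2 hjl hl
      rcases abs_cases (pjf pts l - pjf pts j) with ⟨ha, _⟩ | ⟨ha, _⟩ <;> omega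
    · have h1 := E2_le pts (l := l) (j := j) (by omega) hj
      have h2 := E1_le pts (j := j) (l := j) (le_refl _)
      have h3 := pj_mono hgp.2 (le_of_lt hjl) hj
      rcases abs_cases (pjf pts l - pjf pts j) with ⟨ha, _⟩ | ⟨ha, _⟩ <;> omega
  have hge : Hval pts (pjf pts l) ≤ E2v pts l := by
    rcases E2_attain pts hl with ⟨j, hj1, hj2, he⟩
    rcases E1_attain pts j with ⟨j', hj', he'⟩
    have hmem := mem_pts_getD (show j' < pts.length by omega)
    have h1 := Hval_le hmem (pjf pts l)
    have hp1 : (pts.getD j' (0, 0)).1 = pjf pts j' := rfl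
    have hp2 : (pts.getD j' (0, 0)).2 = hjf pts j' := rfl
    rw [hp1, hp2] at h1
    have h2 := pj_mono hgp.2 hj1 hj2
    have h3 := pj_mono hgp.2 hj' hj2
    rcases abs_cases (pjf pts l - pjf pts j') with ⟨ha, _⟩ | ⟨ha, _⟩ <;> omega
  omega

theorem best0_eq {N : Int} {pts : List (Int × Int)} (hgp : GoodP N pts) (hN : 1 ≤ N) :
    E2v pts (pts.length - 1) + (N - pjf pts (pts.length - 1)) = Hval pts N := by
  have hm : 1 ≤ pts.length := by
    cases pts with
    | nil => exact absurd rfl (pts_ne hgp)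
    | cons a t => simp
  rw [E2_last pts hm]
  have hle : E1v pts (pts.length - 1) + (N - pjf pts (pts.length - 1)) ≤ Hval pts N := by
    rcases Hval_attain (pts_ne hgp) N with ⟨p, hp, he⟩
    rcases idx_of_mem hp with ⟨j, hj, hje⟩
    have hp1 : p.1 = pjf pts j := by unfold pjf; rw [hje]
    have hp2 : p.2 = hjf pts j := by unfold hjf; rw [hje]
    rw [hp1, hp2] at he
    have h1 := E1_le pts (j := j) (l := pts.length - 1) (by omega)
    have h2 := (pj_bounds hgp hj).2
    rcases abs_cases (N - pjf pts j) with ⟨ha, _⟩ | ⟨ha, _⟩ <;> omega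
  have hge : Hval pts N ≤ E1v pts (pts.length - 1) + (N - pjf pts (pts.length - 1)) := by
    rcases E1_attain pts (pts.length - 1) with ⟨j', hj', he'⟩
    have hjlt : j' < pts.length := by omega
    have hmem := mem_pts_getD hjlt
    have h1 := Hval_le hmem N
    have hp1 : (pts.getD j' (0, 0)).1 = pjf pts j' := rfl
    have hp2 : (pts.getD j' (0, 0)).2 = hjf pts j' := rfl
    rw [hp1, hp2] at h1
    have h2 := (pj_bounds hgp hjlt).2
    rcases abs_cases (N - pjf pts j') with ⟨ha, _⟩ | ⟨ha, _⟩ <;> omega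
  omega


-- ---- evaluating port B ----
theorem ptsOf_perm (N : Int) (zs : List (Int × Int)) :
    (ptsOf N zs).Perm ((dictB N zs).items) :=
  PySem.List.sorted_perm _ _ _

theorem ptsOf_goodP (N : Int) (zs : List (Int × Int)) (hN : 1 ≤ N) : GoodP N (ptsOf N zs) := by
  have hperm := ptsOf_perm N zs
  have hgL := dictB_goodL N zs hN
  have hnd : ((ptsOf N zs).map Prod.fst).Nodup := ((hperm.map Prod.fst).nodup_iff).mpr hgL.2.2
  refine ⟨⟨hperm.mem_iff.mpr hgL.1, fun p hp => hgL.2.1 p (hperm.mem_iff.mp hp), hnd⟩, ?_⟩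
  have hle : (ptsOf N zs).Pairwise (fun a b => a.1 ≤ b.1) := PySem.List.sorted_pairwise _ _
  have hne : (ptsOf N zs).Pairwise (fun a b => a.1 ≠ b.1) := List.pairwise_map.mp hnd
  exact (hle.and hne).imp (fun h => lt_of_le_of_ne h.1 h.2)

def step1 (pos : List Int) (e : List Int) (i : Int) : List Int :=
  PySem.List.pySetD e i (min (PySem.List.pyGetD e i 0)
    (PySem.List.pyGetD e (i - 1) 0 + PySem.List.pyGetD pos i 0 - PySem.List.pyGetD pos (i - 1) 0))

def step2 (pos : List Int) (e : List Int) (i : Int) : List Int :=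
  PySem.List.pySetD e i (min (PySem.List.pyGetD e i 0)
    (PySem.List.pyGetD e (i + 1) 0 + PySem.List.pyGetD pos (i + 1) 0 - PySem.List.pyGetD pos i 0))

theorem read_fst (pts : List (Int × Int)) {k : Nat} (h : k < pts.length) :
    PySem.List.pyGetD (pts.map (fun p => p.1)) ((k : Nat) : Int) 0 = pjf pts k := by
  rw [PySem.List.pyGetD_natCast, List.getD_eq_getElem?_getD, List.getElem?_map,
    List.getElem?_eq_getElem h]
  unfold pjf
  rw [getD_lt_length h]
  rfl

theorem pass1_inv (pts : List (Int × Int)) :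
    ∀ t : Nat, t < pts.length →
    ((PySem.List.pyRange 1 ((t : Int) + 1) 1).foldl (step1 (pts.map (fun p => p.1)))
      (pts.map (fun p => p.2))).length = pts.length
    ∧ ∀ k : Nat, k < pts.length →
      ((PySem.List.pyRange 1 ((t : Int) + 1) 1).foldl (step1 (pts.map (fun p => p.1)))
        (pts.map (fun p => p.2)))[k]? = some (if k ≤ t then E1v pts k else hjf pts k) := by
  intro t
  induction t with
  | zero =>
    intro hm
    have h0 : ((0 : Nat) : Int) + 1 = 1 := by norm_num
    rw [h0, PySem.List.pyRange_one_eq_nil (le_refl (1 : Int)), List.foldl_nil]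
    constructor
    · simp
    · intro k hk
      rw [List.getElem?_map, List.getElem?_eq_getElem hk]
      by_cases hk0 : k ≤ 0
      · have : k = 0 := by omega
        subst this
        rw [if_pos (le_refl 0), E1_zero]
        unfold hjf
        rw [getD_lt_length hk]
        rfl
      · rw [if_neg hk0]
        unfold hjf
        rw [getD_lt_length hk]
        rfl
  | succ t ih =>
    intro hlt
    have hlt' : t < pts.length := by omega
    obtain ⟨hlen, hval⟩ := ih hlt'
    have hcast : ((t + 1 : Nat) : Int) + 1 = ((t : Int) + 1) + 1 := by push_cast; ring
    rw [hcast, PySem.List.pyRange_one_succ_right (by omega : (1 : Int) ≤ (t : Int) + 1), List.foldl_append,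
      List.foldl_cons, List.foldl_nil]
    set eP := (PySem.List.pyRange 1 ((t : Int) + 1) 1).foldl (step1 (pts.map (fun p => p.1)))
      (pts.map (fun p => p.2)) with heP
    have hr0 : PySem.List.pyGetD eP ((t : Int) + 1) 0 = hjf pts (t + 1) := by
      rw [show ((t : Int) + 1) = ((t + 1 : Nat) : Int) by push_cast; ring, PySem.List.pyGetD_natCast,
        List.getD_eq_getElem?_getD, hval (t + 1) hlt]
      rw [if_neg (by omega)]
      rfl
    have hr1 : PySem.List.pyGetD eP (((t : Int) + 1) - 1) 0 = E1v pts t := by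
      rw [show (((t : Int) + 1) - 1) = ((t : Nat) : Int) by ring, PySem.List.pyGetD_natCast,
        List.getD_eq_getElem?_getD, hval t (by omega)]
      rw [if_pos (le_refl t)]
      rfl
    have hp0 : PySem.List.pyGetD (pts.map (fun p => p.1)) ((t : Int) + 1) 0 = pjf pts (t + 1) := by
      rw [show ((t : Int) + 1) = ((t + 1 : Nat) : Int) by push_cast; ring]
      exact read_fst pts hlt
    have hp1 : PySem.List.pyGetD (pts.map (fun p => p.1)) (((t : Int) + 1) - 1) 0 = pjf pts t := by
      rw [show (((t : Int) + 1) - 1) = ((t : Nat) : Int) by ring]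
      exact read_fst pts (by omega)
    have hstep : step1 (pts.map (fun p => p.1)) eP ((t : Int) + 1)
        = eP.set (t + 1) (E1v pts (t + 1)) := by
      unfold step1
      rw [hr0, hr1, hp0, hp1,
        show ((t : Int) + 1) = ((t + 1 : Nat) : Int) by push_cast; ring, PySem.List.pySetD_natCast]
      congr 1
      rw [E1_step pts t]
      congr 1
      ring
    rw [hstep]
    constructor
    · simp [hlen]
    · intro k hk
      rw [List.getElem?_set]
      by_cases hkt : t + 1 = k
      · subst hkt
        rw [if_pos rfl, if_pos (by omega), if_pos (by omega)]
      · rw [if_neg hkt, hval k hk]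
        by_cases h1 : k ≤ t
        · rw [if_pos h1, if_pos (by omega)]
        · rw [if_neg h1, if_neg (by omega)]

theorem pass2_go (pts : List (Int × Int)) :
    ∀ (n : Nat) (e : List Int), (n : Int) ≤ (pts.length : Int) - 2 →
    e.length = pts.length →
    (∀ k : Nat, k < pts.length → e[k]? = some (if k ≤ n then E1v pts k else E2v pts k)) →
    ((PySem.List.pyRange (n : Int) (-1) (-1)).foldl (step2 (pts.map (fun p => p.1))) e).length = pts.length
    ∧ ∀ k : Nat, k < pts.length →
      ((PySem.List.pyRange (n : Int) (-1) (-1)).foldl (step2 (pts.map (fun p => p.1))) e)[k]? = some (E2v pts k) := by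
  intro n
  induction n with
  | zero =>
    intro e hn hlen hval
    have hm2 : 2 ≤ pts.length := by omega
    rw [show ((0 : Nat) : Int) = 0 by norm_num,
      PySem.List.pyRange_neg_one_cons (by norm_num : (-1 : Int) < 0), List.foldl_cons,
      show (0 : Int) - 1 = -1 by ring, PySem.List.pyRange_neg_one_eq_nil (le_refl (-1 : Int)),
      List.foldl_nil]
    have hr0 : PySem.List.pyGetD e (0 : Int) 0 = E1v pts 0 := by
      rw [show ((0 : Int)) = ((0 : Nat) : Int) by norm_num, PySem.List.pyGetD_natCast,
        List.getD_eq_getElem?_getD, hval 0 (by omega), if_pos (le_refl 0)]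
      rfl
    have hr1 : PySem.List.pyGetD e ((0 : Int) + 1) 0 = E2v pts 1 := by
      rw [show ((0 : Int) + 1) = ((1 : Nat) : Int) by norm_num, PySem.List.pyGetD_natCast,
        List.getD_eq_getElem?_getD, hval 1 (by omega), if_neg (by omega)]
      rfl
    have hp0 : PySem.List.pyGetD (pts.map (fun p => p.1)) (0 : Int) 0 = pjf pts 0 := by
      rw [show ((0 : Int)) = ((0 : Nat) : Int) by norm_num]
      exact read_fst pts (by omega)
    have hp1 : PySem.List.pyGetD (pts.map (fun p => p.1)) ((0 : Int) + 1) 0 = pjf pts 1 := by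
      rw [show ((0 : Int) + 1) = ((1 : Nat) : Int) by norm_num]
      exact read_fst pts (by omega)
    have hstep : step2 (pts.map (fun p => p.1)) e (0 : Int) = e.set 0 (E2v pts 0) := by
      unfold step2
      rw [hr0, hr1, hp0, hp1, show ((0 : Int)) = ((0 : Nat) : Int) by norm_num,
        PySem.List.pySetD_natCast]
      congr 1
      rw [E2_step pts (l := 0) (by omega)]
      congr 1
      ring
    rw [hstep]
    constructor
    · simp [hlen]
    · intro k hk
      rw [List.getElem?_set]
      by_cases hk0 : 0 = k
      · subst hk0
        rw [if_pos rfl, if_pos (by omega)]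
      · rw [if_neg hk0, hval k hk, if_neg (by omega)]
  | succ n ih =>
    intro e hn hlen hval
    have hlt : n + 1 + 1 < pts.length := by omega
    rw [show ((n + 1 : Nat) : Int) = (n : Int) + 1 by push_cast; ring,
      PySem.List.pyRange_neg_one_cons (by omega : (-1 : Int) < (n : Int) + 1), List.foldl_cons]
    have hr0 : PySem.List.pyGetD e ((n : Int) + 1) 0 = E1v pts (n + 1) := by
      rw [show ((n : Int) + 1) = ((n + 1 : Nat) : Int) by push_cast; ring, PySem.List.pyGetD_natCast,
        List.getD_eq_getElem?_getD, hval (n + 1) (by omega), if_pos (le_refl (n + 1))]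
      rfl
    have hr1 : PySem.List.pyGetD e (((n : Int) + 1) + 1) 0 = E2v pts (n + 2) := by
      rw [show (((n : Int) + 1) + 1) = ((n + 2 : Nat) : Int) by push_cast; ring, PySem.List.pyGetD_natCast,
        List.getD_eq_getElem?_getD, hval (n + 2) (by omega), if_neg (by omega)]
      rfl
    have hp0 : PySem.List.pyGetD (pts.map (fun p => p.1)) ((n : Int) + 1) 0 = pjf pts (n + 1) := by
      rw [show ((n : Int) + 1) = ((n + 1 : Nat) : Int) by push_cast; ring]
      exact read_fst pts (by omega)
    have hp1 : PySem.List.pyGetD (pts.map (fun p => p.1)) (((n : Int) + 1) + 1) 0 = pjf pts (n + 2) := by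
      rw [show (((n : Int) + 1) + 1) = ((n + 2 : Nat) : Int) by push_cast; ring]
      exact read_fst pts (by omega)
    have hstep : step2 (pts.map (fun p => p.1)) e ((n : Int) + 1)
        = e.set (n + 1) (E2v pts (n + 1)) := by
      unfold step2
      rw [hr0, hr1, hp0, hp1, show ((n : Int) + 1) = ((n + 1 : Nat) : Int) by push_cast; ring,
        PySem.List.pySetD_natCast]
      congr 1
      rw [E2_step pts (l := n + 1) (by omega)]
      congr 1
      ring
    rw [show ((n : Int) + 1) - 1 = (n : Int) by ring, hstep]
    refine ih _ (by omega) (by simp [hlen]) ?_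
    intro k hk
    rw [List.getElem?_set]
    by_cases hkn : n + 1 = k
    · subst hkn
      rw [if_pos rfl, if_pos (by omega), if_neg (by omega)]
    · rw [if_neg hkn, hval k hk]
      by_cases h1 : k ≤ n
      · rw [if_pos h1, if_pos (by omega)]
      · by_cases h2 : k ≤ n + 1
        · omega
        · rw [if_neg h1, if_neg (by omega)]


theorem B_result (N : Int) (buildings heights : List Int) (hN : 1 ≤ N) :
    max_height_dp_alt N buildings heights
      = max 0 (bestv N (ptsOf N (buildings.zip heights))) := by
  have hB : max_height_dp_alt N buildings heights
      = max 0 ((PySem.List.pyRange 0 (((ptsOf N (buildings.zip heights)).length : Int) - 1) 1).foldl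
          (fun best i => max best (PySem.Int.floordiv
            (PySem.List.pyGetD ((PySem.List.pyRange (((ptsOf N (buildings.zip heights)).length : Int) - 2) (-1) (-1)).foldl
              (step2 ((ptsOf N (buildings.zip heights)).map (fun p => p.1)))
              ((PySem.List.pyRange 1 ((ptsOf N (buildings.zip heights)).length : Int) 1).foldl
                (step1 ((ptsOf N (buildings.zip heights)).map (fun p => p.1)))
                ((ptsOf N (buildings.zip heights)).map (fun p => p.2)))) i 0
            + PySem.List.pyGetD ((PySem.List.pyRange (((ptsOf N (buildings.zip heights)).length : Int) - 2) (-1) (-1)).foldl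
              (step2 ((ptsOf N (buildings.zip heights)).map (fun p => p.1)))
              ((PySem.List.pyRange 1 ((ptsOf N (buildings.zip heights)).length : Int) 1).foldl
                (step1 ((ptsOf N (buildings.zip heights)).map (fun p => p.1)))
                ((ptsOf N (buildings.zip heights)).map (fun p => p.2)))) (i + 1) 0
            + PySem.List.pyGetD ((ptsOf N (buildings.zip heights)).map (fun p => p.1)) (i + 1) 0
            - PySem.List.pyGetD ((ptsOf N (buildings.zip heights)).map (fun p => p.1)) i 0) 2))
          (PySem.List.pyGetD ((PySem.List.pyRange (((ptsOf N (buildings.zip heights)).length : Int) - 2) (-1) (-1)).foldl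
              (step2 ((ptsOf N (buildings.zip heights)).map (fun p => p.1)))
              ((PySem.List.pyRange 1 ((ptsOf N (buildings.zip heights)).length : Int) 1).foldl
                (step1 ((ptsOf N (buildings.zip heights)).map (fun p => p.1)))
                ((ptsOf N (buildings.zip heights)).map (fun p => p.2)))) (((ptsOf N (buildings.zip heights)).length : Int) - 1) 0
            + (N - PySem.List.pyGetD ((ptsOf N (buildings.zip heights)).map (fun p => p.1)) (((ptsOf N (buildings.zip heights)).length : Int) - 1) 0))) := rfl
  set pts := ptsOf N (buildings.zip heights) with hpts
  have hgp : GoodP N pts := ptsOf_goodP N (buildings.zip heights) hN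
  have hm : 1 ≤ pts.length := by
    rcases pts with _ | ⟨a, t⟩
    · exact absurd rfl (pts_ne hgp)
    · simp
  obtain ⟨hlen1, hval1⟩ := pass1_inv pts (pts.length - 1) (by omega)
  have hc1 : (((pts.length - 1 : Nat)) : Int) + 1 = (pts.length : Int) := by omega
  rw [hc1] at hlen1 hval1
  set e1 := (PySem.List.pyRange 1 (pts.length : Int) 1).foldl (step1 (pts.map (fun p => p.1)))
    (pts.map (fun p => p.2)) with he1
  have he2spec : ((PySem.List.pyRange ((pts.length : Int) - 2) (-1) (-1)).foldl
        (step2 (pts.map (fun p => p.1))) e1).length = pts.length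
      ∧ ∀ k : Nat, k < pts.length →
        ((PySem.List.pyRange ((pts.length : Int) - 2) (-1) (-1)).foldl
          (step2 (pts.map (fun p => p.1))) e1)[k]? = some (E2v pts k) := by
    by_cases hm1 : pts.length = 1
    · rw [hm1]
      rw [show ((1 : Nat) : Int) - 2 = -1 by norm_num,
        PySem.List.pyRange_neg_one_eq_nil (le_refl (-1 : Int)), List.foldl_nil]
      refine ⟨by rw [hlen1, hm1], ?_⟩
      intro k hk
      have hk0 : k = 0 := by omega
      subst hk0
      rw [hval1 0 (by omega), if_pos (by omega)]
      have := E2_last pts hm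
      rw [hm1] at this
      rw [this]
    · have hm2 : 2 ≤ pts.length := by omega
      have hc2 : ((pts.length - 2 : Nat) : Int) = (pts.length : Int) - 2 := by omega
      rw [← hc2]
      apply pass2_go pts (pts.length - 2) e1 (by omega) hlen1
      intro k hk
      rw [hval1 k hk, if_pos (by omega)]
      by_cases h : k ≤ pts.length - 2
      · rw [if_pos h]
      · have hk1 : k = pts.length - 1 := by omega
        rw [if_neg h, hk1, E2_last pts hm]
  obtain ⟨hlen2, hval2⟩ := he2spec
  set e2 := (PySem.List.pyRange ((pts.length : Int) - 2) (-1) (-1)).foldl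
    (step2 (pts.map (fun p => p.1))) e1 with he2
  have hread2 : ∀ k : Nat, k < pts.length → PySem.List.pyGetD e2 ((k : Nat) : Int) 0 = E2v pts k := by
    intro k hk
    rw [PySem.List.pyGetD_natCast, List.getD_eq_getElem?_getD, hval2 k hk]
    rfl
  have hb0 : PySem.List.pyGetD e2 ((pts.length : Int) - 1) 0
      + (N - PySem.List.pyGetD (pts.map (fun p => p.1)) ((pts.length : Int) - 1) 0)
      = E2v pts (pts.length - 1) + (N - pjf pts (pts.length - 1)) := by
    have hc : ((pts.length : Int) - 1) = ((pts.length - 1 : Nat) : Int) := by omega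
    rw [hc, hread2 _ (by omega), read_fst pts (by omega)]
  have hfold : ∀ B0 : Int, (PySem.List.pyRange 0 ((pts.length : Int) - 1) 1).foldl (fun best i =>
      max best (PySem.Int.floordiv (PySem.List.pyGetD e2 i 0 + PySem.List.pyGetD e2 (i + 1) 0
        + PySem.List.pyGetD (pts.map (fun p => p.1)) (i + 1) 0
        - PySem.List.pyGetD (pts.map (fun p => p.1)) i 0) 2)) B0
      = ((List.range (pts.length - 1)).map (peakv pts)).foldl max B0 := by
    intro B0
    rw [show ((pts.length : Int) - 1) = ((pts.length - 1 : Nat) : Int) by omega,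
      PySem.List.pyRange_zero_natCast, List.foldl_map, List.foldl_map]
    apply PySem.List.foldl_congr_mem
    intro acc x hx
    have hxlt : x < pts.length - 1 := List.mem_range.mp hx
    have hcx : ((x : Nat) : Int) + 1 = ((x + 1 : Nat) : Int) := by push_cast; ring
    congr 1
    rw [hcx, hread2 x (by omega), hread2 (x + 1) (by omega), read_fst pts (by omega),
      read_fst pts (by omega)]
    unfold peakv
    congr 1
    ring
  rw [hB, hb0, hfold]
  rfl


-- ---- the peak/tail arguments joining A and B ----
theorem Hval_one_le_zero {N : Int} {pts : List (Int × Int)} (hgp : GoodP N pts) :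
    Hval pts 1 ≤ 0 := by
  have := Hval_le hgp.1.1 1
  simpa using this

theorem tail_H_le {N : Int} {pts : List (Int × Int)} (hgp : GoodP N pts) {i : Int}
    (hp : pjf pts (pts.length - 1) ≤ i) (hiN : i ≤ N) : Hval pts i ≤ Hval pts N := by
  rcases Hval_attain (pts_ne hgp) N with ⟨pp, hpp, he⟩
  rcases idx_of_mem hpp with ⟨j, hj, hje⟩
  have hpp1 : pp.1 = pjf pts j := by unfold pjf; rw [hje]
  have hpp2 : pp.2 = hjf pts j := by unfold hjf; rw [hje]
  rw [hpp1, hpp2] at he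
  have h1 := pj_mono hgp.2 (show j ≤ pts.length - 1 by omega) (by omega)
  have h2 := Hval_le hpp i
  rw [hpp1, hpp2] at h2
  rcases abs_cases (i - pjf pts j) with ⟨ha, _⟩ | ⟨ha, _⟩ <;>
    rcases abs_cases (N - pjf pts j) with ⟨hb, _⟩ | ⟨hb, _⟩ <;> omega

theorem peak_eq_H (N : Int) (pts : List (Int × Int)) (hgp : GoodP N pts) {l : Nat}
    (hl : l + 1 < pts.length) :
    ∃ istar : Int, pjf pts l ≤ istar ∧ istar ≤ pjf pts (l + 1) ∧ peakv pts l = Hval pts istar := by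
  have hne := pts_ne hgp
  have ha : E2v pts l = Hval pts (pjf pts l) := E2_eq_H hgp (by omega)
  have hb : E2v pts (l + 1) = Hval pts (pjf pts (l + 1)) := E2_eq_H hgp hl
  have hD : pjf pts l < pjf pts (l + 1) := pj_lt hgp.2 (by omega) hl
  have hab1 : E2v pts l ≤ E2v pts (l + 1) + (pjf pts (l + 1) - pjf pts l) := by
    have := Hval_lipschitz hne (pjf pts l) (pjf pts (l + 1))
    rw [← ha, ← hb] at this
    rcases abs_cases (pjf pts l - pjf pts (l + 1)) with ⟨h, _⟩ | ⟨h, _⟩ <;> omega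
  have hab2 : E2v pts (l + 1) ≤ E2v pts l + (pjf pts (l + 1) - pjf pts l) := by
    have := Hval_lipschitz hne (pjf pts (l + 1)) (pjf pts l)
    rw [← ha, ← hb] at this
    rcases abs_cases (pjf pts (l + 1) - pjf pts l) with ⟨h, _⟩ | ⟨h, _⟩ <;> omega
  have hq1 := (PySem.Int.floordiv_eq_iff_of_pos (show (0 : Int) < 2 by norm_num)).mp
    (rfl : PySem.Int.floordiv (E2v pts (l + 1) - E2v pts l + (pjf pts (l + 1) - pjf pts l)) 2 = _)
  have hq2 := (PySem.Int.floordiv_eq_iff_of_pos (show (0 : Int) < 2 by norm_num)).mp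
    (rfl : PySem.Int.floordiv (E2v pts l + E2v pts (l + 1) + (pjf pts (l + 1) - pjf pts l)) 2 = _)
  have hpk : peakv pts l
      = PySem.Int.floordiv (E2v pts l + E2v pts (l + 1) + (pjf pts (l + 1) - pjf pts l)) 2 := rfl
  refine ⟨pjf pts l + PySem.Int.floordiv (E2v pts (l + 1) - E2v pts l + (pjf pts (l + 1) - pjf pts l)) 2,
    by omega, by omega, ?_⟩
  set istar := pjf pts l + PySem.Int.floordiv (E2v pts (l + 1) - E2v pts l + (pjf pts (l + 1) - pjf pts l)) 2 with histar
  have hi1 : pjf pts l ≤ istar := by omega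
  have hi2 : istar ≤ pjf pts (l + 1) := by omega
  have hmin : min (E2v pts l + (istar - pjf pts l)) (E2v pts (l + 1) + (pjf pts (l + 1) - istar))
      = peakv pts l := by
    rw [hpk]
    omega
  have hHle : Hval pts istar ≤ min (E2v pts l + (istar - pjf pts l)) (E2v pts (l + 1) + (pjf pts (l + 1) - istar)) := by
    have t1 := Hval_lipschitz hne istar (pjf pts l)
    have t2 := Hval_lipschitz hne istar (pjf pts (l + 1))
    rw [← ha] at t1
    rw [← hb] at t2
    rcases abs_cases (istar - pjf pts l) with ⟨h, _⟩ | ⟨h, _⟩ <;>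
      rcases abs_cases (istar - pjf pts (l + 1)) with ⟨h', _⟩ | ⟨h', _⟩ <;> omega
  have hHge : min (E2v pts l + (istar - pjf pts l)) (E2v pts (l + 1) + (pjf pts (l + 1) - istar))
      ≤ Hval pts istar := by
    rcases Hval_attain hne istar with ⟨pp, hpp, he⟩
    rcases idx_of_mem hpp with ⟨j, hj, hje⟩
    have hpp1 : pp.1 = pjf pts j := by unfold pjf; rw [hje]
    have hpp2 : pp.2 = hjf pts j := by unfold hjf; rw [hje]
    rw [hpp1, hpp2] at he
    rcases le_or_gt j l with hjl | hjl
    · have hmono := pj_mono hgp.2 hjl (by omega)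
      have hHa := Hval_le (mem_pts_getD (show j < pts.length by omega)) (pjf pts l)
      have ga : (pts.getD j (0, 0)).1 = pjf pts j := rfl
      have gb : (pts.getD j (0, 0)).2 = hjf pts j := rfl
      rw [ga, gb] at hHa
      rw [← ha] at hHa
      rcases abs_cases (pjf pts l - pjf pts j) with ⟨h', _⟩ | ⟨h', _⟩ <;>
        rcases abs_cases (istar - pjf pts j) with ⟨h'', _⟩ | ⟨h'', _⟩ <;> omega
    · have hmono := pj_mono hgp.2 (show l + 1 ≤ j by omega) (by omega)
      have hHa := Hval_le (mem_pts_getD (show j < pts.length by omega)) (pjf pts (l + 1))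
      have ga : (pts.getD j (0, 0)).1 = pjf pts j := rfl
      have gb : (pts.getD j (0, 0)).2 = hjf pts j := rfl
      rw [ga, gb] at hHa
      rw [← hb] at hHa
      rcases abs_cases (pjf pts (l + 1) - pjf pts j) with ⟨h', _⟩ | ⟨h', _⟩ <;>
        rcases abs_cases (istar - pjf pts j) with ⟨h'', _⟩ | ⟨h'', _⟩ <;> omega
  omega

theorem AB_glue (N : Int) (L pts : List (Int × Int)) (hN : 1 ≤ N) (hperm : pts.Perm L)
    (hg : GoodL N L) (hgp : GoodP N pts) :
    ((PySem.List.pyRange 2 (N + 1) 1).map (fun i => Gval N L i)).foldl max 0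
      = max 0 (bestv N pts) := by
  have hne := pts_ne hgp
  have hm : 1 ≤ pts.length := by
    rcases pts with _ | ⟨a, t⟩
    · exact absurd rfl hne
    · simp
  have hHLP : ∀ i, Hval L i = Hval pts i := fun i => (Hval_perm hperm i).symm
  have hB0H : E2v pts (pts.length - 1) + (N - pjf pts (pts.length - 1)) = Hval pts N :=
    best0_eq hgp hN
  have hAle : ((PySem.List.pyRange 2 (N + 1) 1).map (fun i => Gval N L i)).foldl max 0
      ≤ max 0 (bestv N pts) := by
    rcases PySem.List.foldl_max_mem ((PySem.List.pyRange 2 (N + 1) 1).map (fun i => Gval N L i)) 0 with h | h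
    · rw [h]
      exact le_max_left _ _
    · rcases List.mem_map.mp h with ⟨i, hi, hval⟩
      rcases PySem.List.mem_pyRange_one.mp hi with ⟨hi2, hiN⟩
      rw [← hval, Gval_eq_Hval hg (by omega) (by omega), hHLP]
      have hP0 : pjf pts 0 ≤ i := by
        rw [(pj_zero hgp).1]
        omega
      have hPl : pjf pts (Nat.findGreatest (fun l => pjf pts l ≤ i) (pts.length - 1)) ≤ i :=
        Nat.findGreatest_spec (P := fun l => pjf pts l ≤ i) (Nat.zero_le _) hP0
      have hls : Nat.findGreatest (fun l => pjf pts l ≤ i) (pts.length - 1) ≤ pts.length - 1 :=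
        Nat.findGreatest_le _
      by_cases htop : Nat.findGreatest (fun l => pjf pts l ≤ i) (pts.length - 1) = pts.length - 1
      · have h1 : Hval pts i ≤ Hval pts N := tail_H_le hgp (by rw [← htop]; exact hPl) (by omega)
        have h2 : E2v pts (pts.length - 1) + (N - pjf pts (pts.length - 1)) ≤ bestv N pts :=
          (PySem.List.le_foldl_max _ _).1
        exact le_trans (le_trans h1 (by omega)) (le_max_right _ _)
      · have hlt : Nat.findGreatest (fun l => pjf pts l ≤ i) (pts.length - 1) < pts.length - 1 :=
          lt_of_le_of_ne hls htop
        set lstar := Nat.findGreatest (fun l => pjf pts l ≤ i) (pts.length - 1) with hlstar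
        have hPn : ¬ pjf pts (lstar + 1) ≤ i :=
          Nat.findGreatest_is_greatest (P := fun l => pjf pts l ≤ i) (n := pts.length - 1) (by omega) (by omega)
        have ha : E2v pts lstar = Hval pts (pjf pts lstar) := E2_eq_H hgp (by omega)
        have hb : E2v pts (lstar + 1) = Hval pts (pjf pts (lstar + 1)) := E2_eq_H hgp (by omega)
        have h1 : Hval pts i ≤ E2v pts lstar + (i - pjf pts lstar) := by
          have := Hval_lipschitz hne i (pjf pts lstar)
          rw [← ha] at this
          rcases abs_cases (i - pjf pts lstar) with ⟨h', _⟩ | ⟨h', _⟩ <;> omega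
        have h2 : Hval pts i ≤ E2v pts (lstar + 1) + (pjf pts (lstar + 1) - i) := by
          have := Hval_lipschitz hne i (pjf pts (lstar + 1))
          rw [← hb] at this
          rcases abs_cases (i - pjf pts (lstar + 1)) with ⟨h', _⟩ | ⟨h', _⟩ <;> omega
        have hpk : Hval pts i ≤ peakv pts lstar := by
          unfold peakv
          rw [PySem.Int.le_floordiv_iff_mul_le (by norm_num)]
          omega
        have hmem : peakv pts lstar ≤ bestv N pts :=
          (PySem.List.le_foldl_max _ _).2 _ (List.mem_map.mpr ⟨lstar, List.mem_range.mpr hlt, rfl⟩)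
        exact le_trans (le_trans hpk hmem) (le_max_right _ _)
  have hBle : max 0 (bestv N pts)
      ≤ ((PySem.List.pyRange 2 (N + 1) 1).map (fun i => Gval N L i)).foldl max 0 := by
    apply max_le
    · exact (PySem.List.le_foldl_max _ _).1
    · apply pvFoldlMax_le
      · rw [hB0H]
        by_cases hN1 : N = 1
        · refine le_trans ?_ (PySem.List.le_foldl_max _ _).1
          rw [hN1]
          exact Hval_one_le_zero hgp
        · have hN2 : 2 ≤ N := by omega
          rw [← hHLP, ← Gval_eq_Hval hg (by omega) (le_refl N)]
          exact (PySem.List.le_foldl_max _ _).2 _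
            (List.mem_map.mpr ⟨N, PySem.List.mem_pyRange_one.mpr ⟨hN2, by omega⟩, rfl⟩)
      · intro y hy
        rcases List.mem_map.mp hy with ⟨l, hl, rfl⟩
        have hllt : l < pts.length - 1 := List.mem_range.mp hl
        rcases peak_eq_H N pts hgp (show l + 1 < pts.length by omega) with ⟨istar, hi1, hi2, hpe⟩
        rw [hpe]
        have hp1 := (pj_bounds hgp (k := l) (by omega)).1
        by_cases his : 2 ≤ istar
        · have hisN : istar ≤ N := le_trans hi2 (pj_bounds hgp (k := l + 1) (by omega)).2
          rw [← hHLP, ← Gval_eq_Hval hg (by omega) hisN]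
          exact (PySem.List.le_foldl_max _ _).2 _
            (List.mem_map.mpr ⟨istar, PySem.List.mem_pyRange_one.mpr ⟨his, by omega⟩, rfl⟩)
        · have hone : istar = 1 := by omega
          refine le_trans ?_ (PySem.List.le_foldl_max _ _).1
          rw [hone]
          exact Hval_one_le_zero hgp
  exact le_antisymm hAle hBle

theorem max_height_dp_spec' : ∀ (N : Int) (buildings : List Int) (heights : List Int),
    1 ≤ N → max_height_dp N buildings heights = max_height_dp_alt N buildings heights := by
  intro N buildings heights hN
  rw [A_result N buildings heights hN, B_result N buildings heights hN]
  exact AB_glue N ((dictB N (buildings.zip heights)).items) (ptsOf N (buildings.zip heights)) hN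
    (ptsOf_perm N (buildings.zip heights)) (dictB_goodL N (buildings.zip heights) hN)
    (ptsOf_goodP N (buildings.zip heights) hN)

-- ===== VERDICT (by name: the statement is the Claim_ definition above) =====
theorem max_height_dp_spec : Claim_equal_max_height_dp := by
  intro N buildings heights _ hpre
  unfold Spec_max_height_dp
  exact max_height_dp_spec' N buildings heights hpre
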